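-- pv_equiv track=rewrite | github.com/Rvelamen/Octopus | backend/channels/desktop/handlers/knowledge.py | _detect_zip_root_prefix
-- ===== SOURCE A (Python) =====
-- def _detect_zip_root_prefix(namelist: list[str]) -> str:
--     """If zip has a single root folder containing vault data, return its prefix."""
--     top_dirs = {name.split("/")[0] for name in namelist if "/" in name}
--     if len(top_dirs) != 1:
--         return ""
--     prefix = top_dirs.pop() + "/"
--     has_obsidian = any(name.startswith(prefix + ".obsidian/") for name in namelist)
--     has_md = any(name.startswith(prefix) and name.endswith(".md") for name in namelist)
--     return prefix if (has_obsidian or has_md) else ""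
-- ===== SOURCE B (Python) =====
-- def _detect_zip_root_prefix(namelist: list[str]) -> str:
--     """Single pass: index roots -> 'has .obsidian/ or .md under it' flag, then inspect."""
--     flags = {}
--     for name in namelist:
--         i = name.find("/")
--         if i == -1:
--             continue
--         root = name[:i]
--         rest = name[i + 1:]
--         hit = rest.startswith(".obsidian/") or name.endswith(".md")
--         flags[root] = flags.get(root, False) or hit
--     if len(flags) != 1:
--         return ""
--     root, ok = flags.popitem()
--     return root + "/" if ok else ""
-- ===== Notes on version B (the rewrite author's own statement) =====
-- stated objective: alternative
-- what changed: Replaces the set comprehension plus two separate whole-list any() scans with a single pass that builds a root->flag dictionary (flag = that root has a '.obsidian/' subpath or a '.md' file) and then reads the answer off the one-entry index.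
import Mathlib
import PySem

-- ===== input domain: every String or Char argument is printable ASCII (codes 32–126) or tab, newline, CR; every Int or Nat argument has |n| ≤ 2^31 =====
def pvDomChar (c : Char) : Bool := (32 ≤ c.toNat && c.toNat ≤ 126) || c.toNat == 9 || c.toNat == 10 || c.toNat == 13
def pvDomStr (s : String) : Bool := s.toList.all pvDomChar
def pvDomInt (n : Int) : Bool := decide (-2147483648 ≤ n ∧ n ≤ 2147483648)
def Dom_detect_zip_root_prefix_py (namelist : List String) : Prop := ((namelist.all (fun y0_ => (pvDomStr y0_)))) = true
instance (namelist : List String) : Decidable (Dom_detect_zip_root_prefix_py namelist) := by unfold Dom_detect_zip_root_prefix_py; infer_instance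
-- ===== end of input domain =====

-- B replaces A's set comprehension plus two whole-list any() scans by ONE pass building a
-- root -> flag dictionary (flag = that root has a '.obsidian/' subpath or a '.md' file),
-- then reads the answer off the one-entry index (objective: alternative decomposition).

-- ===== PORT A =====
def detect_zip_root_prefix_py (namelist : List String) : String :=
  let top_dirs : PySem.Set String :=
    PySem.Set.ofList ((namelist.filter (fun name => PySem.Str.isIn "/" name)).map
      (fun name =>
        match PySem.Str.split? name "/" with
        | some parts => PySem.List.pyGetD parts 0 ""
        | none => ""))     -- none unreachable: the separator "/" is nonempty
  if PySem.Set.len top_dirs ≠ 1 then ""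
  else
    let pre := top_dirs.headD "" ++ "/"   -- pop() on a one-element set yields its element
    let has_obsidian := namelist.any (fun name => PySem.Str.startswith name (pre ++ ".obsidian/"))
    let has_md := namelist.any (fun name => PySem.Str.startswith name pre && PySem.Str.endswith name ".md")
    if has_obsidian || has_md then pre else ""

-- ===== PORT B =====
def detect_zip_root_prefix_py_alt (namelist : List String) : String :=
  let flags : PySem.Dict String Bool :=
    namelist.foldl (fun flags name =>
      let i := PySem.Str.find name "/"
      if i = -1 then flags
      else
        let root := PySem.Str.slice name none (some i)
        let rest := PySem.Str.slice name (some (i + 1)) none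
        let hit := PySem.Str.startswith rest ".obsidian/" || PySem.Str.endswith name ".md"
        flags.insert root (flags.getD root false || hit)) PySem.Dict.empty
  if flags.size ≠ 1 then ""
  else
    match flags.items.getLast? with    -- popitem() on the one-entry dict
    | some (root, ok) => if ok then root ++ "/" else ""
    | none => ""

-- ===== PRECONDITION & SPEC =====
def Spec_detect_zip_root_prefix_py (namelist : List String) (out : String) : Prop := out = detect_zip_root_prefix_py_alt namelist
instance (namelist : List String) (out : String) : Decidable (Spec_detect_zip_root_prefix_py namelist out) := by unfold Spec_detect_zip_root_prefix_py; infer_instance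

-- ===== CLAIM (what is proved, stated in full; the proofs are below) =====
def Claim_equal_detect_zip_root_prefix_py : Prop := ∀ (namelist : List String), Dom_detect_zip_root_prefix_py namelist → Spec_detect_zip_root_prefix_py namelist (detect_zip_root_prefix_py namelist)

-- ===== LEMMAS AND PROOFS =====

-- The first '/'-free segment of a character list: the "root" of a zip member name.
def pvRootC (cs : List Char) : List Char := cs.takeWhile (fun c => c != '/')

-- B's per-name key and flag, as named functions (B's fold body in canonical form).
def pvKeyF (s : String) : String := PySem.Str.slice s none (some (PySem.Str.find s "/"))

def pvHitF (s : String) : Bool :=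
  PySem.Str.startswith (PySem.Str.slice s (some (PySem.Str.find s "/" + 1)) none) ".obsidian/"
    || PySem.Str.endswith s ".md"

theorem pv_find_go (cs : List Char) : ∀ k : Nat, PySem.Chars.find.go ['/'] cs k =
    if '/' ∈ cs then ((k : Int) + (pvRootC cs).length) else -1 := by
  induction cs with
  | nil => intro k; simp [PySem.Chars.find.go]
  | cons c t ih =>
    intro k
    by_cases hc : c = '/'
    · subst hc; simp [PySem.Chars.find.go, List.isPrefixOf, pvRootC]
    · have hp : (['/'].isPrefixOf (c :: t)) = false := by
        simp [List.isPrefixOf]; exact fun h => hc h.symm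
      rw [PySem.Chars.find.go, hp]
      have hcb : (c != '/') = true := by simpa using hc
      simp only [Bool.false_eq_true, if_false, ih (k+1), pvRootC, List.takeWhile, hcb]
      by_cases h : '/' ∈ t
      · simp [h, Ne.symm hc]; ring
      · simp [h, Ne.symm hc]

theorem pv_find_slash (cs : List Char) :
    PySem.Chars.find cs ['/'] = if '/' ∈ cs then ((pvRootC cs).length : Int) else -1 := by
  have := pv_find_go cs 0
  simpa [PySem.Chars.find] using this

theorem pv_go_acc (sep : List Char) : ∀ (fuel : Nat) (l cur : List Char) (acc : List (List Char)),
    PySem.Chars.splitOn.go sep fuel l cur acc = acc.reverse ++ PySem.Chars.splitOn.go sep fuel l cur [] := by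
  intro fuel
  induction fuel with
  | zero => intro l cur acc; simp [PySem.Chars.splitOn.go]
  | succ f ih =>
    intro l cur acc
    match l with
    | [] => simp [PySem.Chars.splitOn.go]
    | (c :: rest) =>
      rw [PySem.Chars.splitOn.go, PySem.Chars.splitOn.go]
      by_cases hp : sep.isPrefixOf (c :: rest) = true
      · simp only [hp, if_true]
        rw [ih _ _ (cur.reverse :: acc), ih _ _ ([cur.reverse])]
        simp
      · simp only [hp]
        exact ih _ _ acc

theorem pv_go_head : ∀ (fuel : Nat) (l cur : List Char), l.length ≤ fuel →
    (PySem.Chars.splitOn.go ['/'] fuel l cur []).head? = some (cur.reverse ++ pvRootC l) := by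
  intro fuel
  induction fuel with
  | zero =>
    intro l cur h
    have : l = [] := List.eq_nil_of_length_eq_zero (Nat.le_zero.mp h)
    subst this
    simp [PySem.Chars.splitOn.go, pvRootC]
  | succ f ih =>
    intro l cur h
    match l with
    | [] => simp [PySem.Chars.splitOn.go, pvRootC]
    | (c :: rest) =>
      rw [PySem.Chars.splitOn.go]
      by_cases hc : c = '/'
      · subst hc
        have hp : (['/'].isPrefixOf ('/' :: rest)) = true := by simp [List.isPrefixOf]
        simp only [hp, if_true]
        rw [pv_go_acc]
        simp [pvRootC]
      · have hp : (['/'].isPrefixOf (c :: rest)) = false := by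
          simp [List.isPrefixOf]; exact fun h => hc h.symm
        simp only [hp, Bool.false_eq_true, if_false]
        rw [ih rest (c :: cur) (by simpa using Nat.le_of_succ_le_succ h)]
        have hcb : (c != '/') = true := by simpa using hc
        simp [pvRootC, List.takeWhile, hcb]

theorem pv_splitOn_head (cs : List Char) :
    (PySem.Chars.splitOn cs ['/']).head? = some (pvRootC cs) := by
  rw [PySem.Chars.splitOn]
  simpa using pv_go_head (cs.length + 1) cs [] (by omega)

theorem pv_root_no_slash (cs : List Char) : '/' ∉ pvRootC cs := by
  intro h
  have := List.mem_takeWhile_imp h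
  simp at this

theorem pv_decomp (cs : List Char) (h : '/' ∈ cs) :
    cs = pvRootC cs ++ '/' :: cs.drop ((pvRootC cs).length + 1) := by
  induction cs with
  | nil => simp at h
  | cons c t ih =>
    by_cases hc : c = '/'
    · subst hc; simp [pvRootC]
    · have hcb : (c != '/') = true := by simpa using hc
      have ht : '/' ∈ t := by
        rcases List.mem_cons.mp h with h1 | h1
        · exact absurd h1.symm hc
        · exact h1
      have := ih ht
      simp only [pvRootC, List.takeWhile, hcb] at *
      calc c :: t = c :: (t.takeWhile (fun c => c != '/') ++ '/' :: t.drop ((t.takeWhile (fun c => c != '/')).length + 1)) := by rw [← this]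
        _ = _ := by simp

theorem pv_root_of_append (r t : List Char) (hr : '/' ∉ r) :
    pvRootC (r ++ '/' :: t) = r := by
  induction r with
  | nil => simp [pvRootC]
  | cons c s ih =>
    have hc : c ≠ '/' := fun h => hr (h ▸ List.mem_cons_self ..)
    have hcb : (c != '/') = true := by simpa using hc
    have := ih (fun h => hr (List.mem_cons_of_mem _ h))
    simp only [pvRootC, List.cons_append, List.takeWhile, hcb] at *
    simp [this]

theorem pv_isIn_iff (s : String) : PySem.Str.isIn "/" s = true ↔ '/' ∈ s.toList := by
  rw [PySem.Str.isIn_eq]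
  show PySem.Chars.isIn ['/'] s.toList = true ↔ _
  rw [PySem.Chars.isIn, pv_find_slash]
  by_cases h : '/' ∈ s.toList <;> simp [h]

theorem pv_find_eq (s : String) (h : '/' ∈ s.toList) :
    PySem.Str.find s "/" = ((pvRootC s.toList).length : Int) := by
  rw [PySem.Str.find_eq]
  show PySem.Chars.find s.toList ['/'] = _
  rw [pv_find_slash]; simp [h]

theorem pv_find_neg_iff (s : String) : PySem.Str.find s "/" = -1 ↔ '/' ∉ s.toList := by
  rw [PySem.Str.find_eq]
  show PySem.Chars.find s.toList ['/'] = -1 ↔ _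
  rw [pv_find_slash]
  by_cases h : '/' ∈ s.toList <;> simp [h]

theorem pv_key_toList (s : String) (h : '/' ∈ s.toList) :
    (pvKeyF s).toList = pvRootC s.toList := by
  rw [pvKeyF, PySem.Str.toList_slice, PySem.Chars.slice_eq_listSlice, pv_find_eq s h,
    PySem.List.slice_to _ (by positivity)]
  simp only [Int.toNat_natCast]
  exact (List.prefix_iff_eq_take.mp (List.takeWhile_prefix _)).symm

theorem pv_rest_toList (s : String) (h : '/' ∈ s.toList) :
    (PySem.Str.slice s (some (PySem.Str.find s "/" + 1)) none).toList
      = s.toList.drop ((pvRootC s.toList).length + 1) := by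
  rw [PySem.Str.toList_slice, PySem.Chars.slice_eq_listSlice, pv_find_eq s h,
    PySem.List.slice_from _ (by positivity)]
  norm_num

theorem pv_split_elem (s : String) :
    (match PySem.Str.split? s "/" with
      | some parts => PySem.List.pyGetD parts 0 ""
      | none => "") = String.ofList (pvRootC s.toList) := by
  rw [PySem.Str.split?.eq_1, PySem.Chars.split?.eq_1]
  have hsep : (("/" : String).toList.isEmpty) = false := rfl
  rw [hsep]
  simp only [Bool.false_eq_true, if_false, Option.map_some]
  have hh := pv_splitOn_head s.toList
  show PySem.List.pyGetD (List.map String.ofList (PySem.Chars.splitOn s.toList ("/").toList)) 0 "" = _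
  have hl : ("/" : String).toList = ['/'] := rfl
  rw [hl]
  rcases hsp : PySem.Chars.splitOn s.toList ['/'] with _ | ⟨hd, tl⟩
  · rw [hsp] at hh; simp at hh
  · rw [hsp] at hh; simp at hh
    have h0 : ((0 : Int)) = ((0 : Nat) : Int) := rfl
    rw [h0, PySem.List.pyGetD_natCast]
    simp [hh]

theorem pv_fold_filter (namelist : List String) (d : PySem.Dict String Bool) :
    namelist.foldl (fun flags name =>
      let i := PySem.Str.find name "/"
      if i = -1 then flags
      else
        let root := PySem.Str.slice name none (some i)
        let rest := PySem.Str.slice name (some (i + 1)) none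
        let hit := PySem.Str.startswith rest ".obsidian/" || PySem.Str.endswith name ".md"
        flags.insert root (flags.getD root false || hit)) d
    = (namelist.filter (fun n => PySem.Str.isIn "/" n)).foldl
        (fun d n => d.insert (pvKeyF n) (d.getD (pvKeyF n) false || pvHitF n)) d := by
  induction namelist generalizing d with
  | nil => simp
  | cons a t ih =>
    simp only [List.foldl_cons, List.filter_cons]
    by_cases hs : '/' ∈ a.toList
    · have hIn : PySem.Str.isIn "/" a = true := (pv_isIn_iff a).mpr hs
      have hf : ¬ (PySem.Str.find a "/" = -1) := by rw [pv_find_neg_iff]; simpa using hs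
      rw [hIn]
      simp only [if_true, List.foldl_cons, if_neg hf]
      exact ih _
    · have hIn : PySem.Str.isIn "/" a = false := by
        rcases Bool.eq_false_or_eq_true (PySem.Str.isIn "/" a) with h | h
        · exact absurd ((pv_isIn_iff a).mp h) hs
        · exact h
      have hf : PySem.Str.find a "/" = -1 := (pv_find_neg_iff a).mpr hs
      rw [hIn]
      simp only [Bool.false_eq_true, if_false, if_pos hf]
      exact ih _

theorem pv_fold_getD (r : String) : ∀ (L : List String), (∀ n ∈ L, pvKeyF n = r) →
    ∀ d : PySem.Dict String Bool,
    (L.foldl (fun d n => d.insert (pvKeyF n) (d.getD (pvKeyF n) false || pvHitF n)) d).getD r false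
      = (d.getD r false || L.any pvHitF) := by
  intro L
  induction L with
  | nil => intro _ d; simp
  | cons a t ih =>
    intro hall d
    simp only [List.foldl_cons, List.any_cons]
    rw [ih (fun n hn => hall n (List.mem_cons_of_mem _ hn)), hall a List.mem_cons_self,
      PySem.Dict.getD_insert]
    simp [Bool.or_assoc]

theorem pv_pred_iff (r s : String) (hr : '/' ∉ r.toList) :
    ((PySem.Str.startswith s ((r ++ "/") ++ ".obsidian/") = true) ∨
     ((PySem.Str.startswith s (r ++ "/") && PySem.Str.endswith s ".md") = true))
    ↔ ('/' ∈ s.toList ∧ pvRootC s.toList = r.toList ∧ pvHitF s = true) := by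
  have hobs : ((r ++ "/") ++ ".obsidian/").toList = r.toList ++ '/' :: (".obsidian/").toList := by
    simp
  have hpre : (r ++ "/").toList = r.toList ++ ['/'] := by simp
  constructor
  · rintro (h | h)
    · rw [PySem.Str.startswith_eq, PySem.Chars.startswith_iff, hobs] at h
      obtain ⟨u, hu⟩ := h
      have hs' : s.toList = r.toList ++ '/' :: ((".obsidian/").toList ++ u) := by
        simpa using hu.symm
      have hmem : '/' ∈ s.toList := by rw [hs']; simp
      have hroot : pvRootC s.toList = r.toList := by rw [hs']; exact pv_root_of_append _ _ hr
      refine ⟨hmem, hroot, ?_⟩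
      have hrest : (PySem.Str.slice s (some (PySem.Str.find s "/" + 1)) none).toList
          = (".obsidian/").toList ++ u := by
        rw [pv_rest_toList s hmem, hroot, hs',
          show r.toList ++ '/' :: ((".obsidian/").toList ++ u)
              = (r.toList ++ ['/']) ++ ((".obsidian/").toList ++ u) by simp]
        exact List.drop_left' (by simp)
      rw [pvHitF, Bool.or_eq_true]
      left
      rw [PySem.Str.startswith_eq, PySem.Chars.startswith_iff, hrest]
      exact List.prefix_append _ _
    · rw [Bool.and_eq_true] at h
      obtain ⟨h1, h2⟩ := h
      rw [PySem.Str.startswith_eq, PySem.Chars.startswith_iff, hpre] at h1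
      obtain ⟨u, hu⟩ := h1
      have hs' : s.toList = r.toList ++ '/' :: u := by simpa using hu.symm
      have hmem : '/' ∈ s.toList := by rw [hs']; simp
      have hroot : pvRootC s.toList = r.toList := by rw [hs']; exact pv_root_of_append _ _ hr
      refine ⟨hmem, hroot, ?_⟩
      rw [pvHitF, Bool.or_eq_true]
      right
      exact h2
  · rintro ⟨hmem, hroot, hhit⟩
    have hs' := pv_decomp s.toList hmem
    rw [hroot] at hs'
    rw [pvHitF, Bool.or_eq_true] at hhit
    rcases hhit with hhit | hhit
    · left
      have hrest : (PySem.Str.slice s (some (PySem.Str.find s "/" + 1)) none).toList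
          = s.toList.drop (r.toList.length + 1) := by
        rw [pv_rest_toList s hmem, hroot]
      rw [PySem.Str.startswith_eq, PySem.Chars.startswith_iff, hrest] at hhit
      obtain ⟨u, hu⟩ := hhit
      rw [PySem.Str.startswith_eq, PySem.Chars.startswith_iff, hobs]
      refine ⟨u, ?_⟩
      conv_rhs => rw [hs']
      rw [← hu]
      simp
    · right
      rw [Bool.and_eq_true]
      refine ⟨?_, hhit⟩
      rw [PySem.Str.startswith_eq, PySem.Chars.startswith_iff, hpre, hs']
      exact ⟨List.drop (r.toList.length + 1) s.toList, by simp⟩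

theorem pv_main (namelist : List String) :
    detect_zip_root_prefix_py namelist = detect_zip_root_prefix_py_alt namelist := by
  unfold detect_zip_root_prefix_py detect_zip_root_prefix_py_alt
  rw [pv_fold_filter]
  rw [funext pv_split_elem]
  set F := namelist.filter (fun n => PySem.Str.isIn "/" n) with hF
  set RootsA := F.map (fun n => String.ofList (pvRootC n.toList)) with hR
  set flags := F.foldl (fun d n => d.insert (pvKeyF n) (d.getD (pvKeyF n) false || pvHitF n))
    PySem.Dict.empty with hfl
  have hkeys : flags.keys = PySem.Set.ofList RootsA := by
    rw [hfl, PySem.Dict.keys_foldl_insert_key, PySem.Dict.keys_empty, PySem.Set.update_nil_left]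
    congr 1
    apply List.map_congr_left
    intro n hn
    have hs : '/' ∈ n.toList := (pv_isIn_iff n).mp (List.mem_filter.mp hn).2
    rw [← String.toList_inj, pv_key_toList n hs, String.toList_ofList]
  have hsz : flags.size = (PySem.Set.ofList RootsA).length := by
    have : flags.size = flags.keys.length := by simp [PySem.Dict.size, PySem.Dict.keys]
    rw [this, hkeys]
  by_cases h1 : (PySem.Set.ofList RootsA).length = 1
  · -- exactly one root
    obtain ⟨r, hr1⟩ := List.length_eq_one_iff.mp h1
    have hrmem : r ∈ RootsA := by
      have : r ∈ PySem.Set.ofList RootsA := by rw [hr1]; exact List.mem_cons_self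
      exact (PySem.Set.mem_ofList _ _).mp this
    have hrns : '/' ∉ r.toList := by
      obtain ⟨n, _, hn⟩ := List.mem_map.mp hrmem
      rw [← hn, String.toList_ofList]
      exact pv_root_no_slash _
    have hall : ∀ n ∈ F, pvKeyF n = r := by
      intro n hn
      have h2 : pvKeyF n ∈ F.map pvKeyF := List.mem_map_of_mem hn
      have h3 : F.map pvKeyF = RootsA := by
        apply List.map_congr_left
        intro m hm
        have hs : '/' ∈ m.toList := (pv_isIn_iff m).mp (List.mem_filter.mp hm).2
        rw [← String.toList_inj, pv_key_toList m hs, String.toList_ofList]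
      rw [h3] at h2
      have h4 : pvKeyF n ∈ PySem.Set.ofList RootsA := (PySem.Set.mem_ofList _ _).mpr h2
      rw [hr1] at h4
      simpa using h4
    have hnodup : flags.keys.Nodup := by
      rw [hfl]
      exact PySem.Dict.nodup_keys_foldl_insert_key _ _ _ _ PySem.Dict.nodup_keys_empty
    have hitems : flags.items = [(r, flags.getD r false)] := by
      rw [PySem.Dict.items_eq_map_keys _ hnodup false, hkeys, hr1]
      simp
    have hv : flags.getD r false = F.any pvHitF := by
      rw [hfl, pv_fold_getD r F hall, PySem.Dict.getD_empty]
      simp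
    have hcondA : ¬ (PySem.Set.len (PySem.Set.ofList RootsA) ≠ 1) := by
      simp only [PySem.Set.len, h1]
      simp
    have hcondB : ¬ (flags.size ≠ 1) := by rw [hsz]; simpa using h1
    rw [if_neg hcondA, if_neg hcondB, hitems, hr1]
    simp only [List.getLast?_singleton, List.headD_cons, hv]
    have hany : (namelist.any (fun name => PySem.Str.startswith name ((r ++ "/") ++ ".obsidian/"))
        || namelist.any (fun name =>
            PySem.Str.startswith name (r ++ "/") && PySem.Str.endswith name ".md"))
        = F.any pvHitF := by
      rw [Bool.eq_iff_iff, Bool.or_eq_true]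
      constructor
      · intro hx
        rcases hx with hx | hx
        · obtain ⟨n, hn, hp⟩ := List.any_eq_true.mp hx
          obtain ⟨hsl, _, hht⟩ := (pv_pred_iff r n hrns).mp (Or.inl hp)
          exact List.any_eq_true.mpr ⟨n, List.mem_filter.mpr ⟨hn, (pv_isIn_iff n).mpr hsl⟩, hht⟩
        · obtain ⟨n, hn, hp⟩ := List.any_eq_true.mp hx
          obtain ⟨hsl, _, hht⟩ := (pv_pred_iff r n hrns).mp (Or.inr hp)
          exact List.any_eq_true.mpr ⟨n, List.mem_filter.mpr ⟨hn, (pv_isIn_iff n).mpr hsl⟩, hht⟩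
      · intro hx
        obtain ⟨n, hn, hht⟩ := List.any_eq_true.mp hx
        obtain ⟨hn', hin⟩ := List.mem_filter.mp hn
        have hsl := (pv_isIn_iff n).mp hin
        have hrt : pvRootC n.toList = r.toList := by
          rw [← pv_key_toList n hsl, hall n hn]
        rcases (pv_pred_iff r n hrns).mpr ⟨hsl, hrt, hht⟩ with hp | hp
        · exact Or.inl (List.any_eq_true.mpr ⟨n, hn', hp⟩)
        · exact Or.inr (List.any_eq_true.mpr ⟨n, hn', hp⟩)
    rw [hany]
  · -- zero or several roots: both sides return ""
    have hcondA : PySem.Set.len (PySem.Set.ofList RootsA) ≠ 1 := by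
      simp only [PySem.Set.len]
      exact fun hh => h1 (by exact_mod_cast hh)
    have hcondB : flags.size ≠ 1 := by rw [hsz]; exact h1
    rw [if_pos hcondA, if_pos hcondB]

-- ===== VERDICT (by name: the statement is the Claim_ definition above) =====
theorem detect_zip_root_prefix_py_spec : Claim_equal_detect_zip_root_prefix_py := by
  intro namelist _
  unfold Spec_detect_zip_root_prefix_py
  exact pv_main namelist
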